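-- pv_equiv track=rewrite | github.com/mbusc1/Python-Projects | q5helper/q5solution.py | merge_chars
-- ===== SOURCE A (Python) =====
-- def merge_chars(a : str, b : str) -> str:
--     #base
--     if len(a) == 0 and len(b) ==  0: return ""
--     #non-base
--     if len(a) == 0:
--         return str(b[0]) + merge_chars("", b[1:])
--     if len(b) == 0:
--         return str(a[0]) + merge_chars(a[1:], "")
--
--     if a[0] < b[0]:
--         return str(a[0]) + merge_chars(a[1:], b)
--     else:
--         return str(b[0]) + merge_chars(a, b[1:])
-- ===== SOURCE B (Python) =====
-- def merge_chars(a: str, b: str) -> str: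
--     # iterative two-pointer merge, O(n+m)
--     i = j = 0
--     out = []
--     while i < len(a) and j < len(b):
--         if a[i] < b[j]:
--             out.append(a[i])
--             i += 1
--         else:
--             out.append(b[j])
--             j += 1
--     return ''.join(out) + a[i:] + b[j:]
-- ===== Notes on version B (the rewrite author's own statement) =====
-- stated objective: faster
-- what changed: Replaced the O(n^2) recursion (each step slices strings and concatenates to the result) with an iterative two-pointer merge that appends characters to a list and joins once.
import Mathlib
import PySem

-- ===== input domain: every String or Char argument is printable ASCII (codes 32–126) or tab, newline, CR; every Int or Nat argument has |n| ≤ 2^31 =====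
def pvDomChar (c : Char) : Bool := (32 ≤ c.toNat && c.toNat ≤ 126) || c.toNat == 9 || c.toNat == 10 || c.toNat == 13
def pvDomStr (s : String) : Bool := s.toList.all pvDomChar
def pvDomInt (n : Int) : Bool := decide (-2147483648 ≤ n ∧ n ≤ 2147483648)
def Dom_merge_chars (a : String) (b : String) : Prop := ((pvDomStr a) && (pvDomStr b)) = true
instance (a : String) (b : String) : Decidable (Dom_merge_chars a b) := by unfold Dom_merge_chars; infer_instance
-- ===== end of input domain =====

-- B replaces A's quadratic slice-and-concatenate recursion with an O(n+m) two-pointer merge into an accumulator.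

-- ===== PORT A =====
-- A's recursion, step for step over the characters (a[1:] = tail, a[0] = head).
def mergeCharsRecA : List Char → List Char → List Char
  | [], [] => []
  | [], bc :: bs => bc :: mergeCharsRecA [] bs
  | ac :: as', [] => ac :: mergeCharsRecA as' []
  | ac :: as', bc :: bs =>
      if ac < bc then ac :: mergeCharsRecA as' (bc :: bs)
      else bc :: mergeCharsRecA (ac :: as') bs
  termination_by a b => a.length + b.length

def merge_chars (a : String) (b : String) : String :=
  String.mk (mergeCharsRecA a.toList b.toList)

-- ===== PORT B =====
-- B's while loop: two pointers advance, chars go into an accumulator (the 'out' list),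
-- then the leftover tails are appended once at the end.
def mergeCharsLoopB : List Char → List Char → List Char → List Char
  | ac :: as', bc :: bs, acc =>
      if ac < bc then mergeCharsLoopB as' (bc :: bs) (ac :: acc)
      else mergeCharsLoopB (ac :: as') bs (bc :: acc)
  | as', bs, acc => acc.reverse ++ as' ++ bs
  termination_by a b _ => a.length + b.length

def merge_chars_alt (a : String) (b : String) : String :=
  String.mk (mergeCharsLoopB a.toList b.toList [])

-- ===== PRECONDITION & SPEC =====
def Spec_merge_chars (a : String) (b : String) (out : String) : Prop := out = merge_chars_alt a b
instance (a : String) (b : String) (out : String) : Decidable (Spec_merge_chars a b out) := by unfold Spec_merge_chars; infer_instance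

-- ===== CLAIM (what is proved, stated in full; the proofs are below) =====
def Claim_equal_merge_chars : Prop := ∀ (a : String) (b : String), Dom_merge_chars a b → Spec_merge_chars a b (merge_chars a b)

-- ===== LEMMAS AND PROOFS =====
theorem mergeCharsRecA_nil_right : ∀ (as' : List Char), mergeCharsRecA as' [] = as'
  | [] => by simp [mergeCharsRecA]
  | ac :: as' => by simp [mergeCharsRecA, mergeCharsRecA_nil_right as']

theorem mergeCharsRecA_nil_left : ∀ (bs : List Char), mergeCharsRecA [] bs = bs
  | [] => by simp [mergeCharsRecA]
  | bc :: bs => by simp [mergeCharsRecA, mergeCharsRecA_nil_left bs]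

theorem mergeCharsLoopB_eq : ∀ (as' bs acc : List Char),
    mergeCharsLoopB as' bs acc = acc.reverse ++ mergeCharsRecA as' bs
  | [], bs, acc => by simp [mergeCharsLoopB, mergeCharsRecA_nil_left]
  | ac :: as', [], acc => by simp [mergeCharsLoopB, mergeCharsRecA_nil_right]
  | ac :: as', bc :: bs, acc => by
      by_cases h : ac < bc
      · rw [show mergeCharsLoopB (ac :: as') (bc :: bs) acc
              = mergeCharsLoopB as' (bc :: bs) (ac :: acc) by simp [mergeCharsLoopB, h]]
        rw [mergeCharsLoopB_eq as' (bc :: bs) (ac :: acc)]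
        simp [mergeCharsRecA, h]
      · rw [show mergeCharsLoopB (ac :: as') (bc :: bs) acc
              = mergeCharsLoopB (ac :: as') bs (bc :: acc) by simp [mergeCharsLoopB, h]]
        rw [mergeCharsLoopB_eq (ac :: as') bs (bc :: acc)]
        simp [mergeCharsRecA, h]
  termination_by a b _ => a.length + b.length

-- ===== VERDICT (by name: the statement is the Claim_ definition above) =====
theorem merge_chars_spec : Claim_equal_merge_chars := by
  intro a b _
  unfold Spec_merge_chars merge_chars merge_chars_alt
  rw [mergeCharsLoopB_eq]
  simp
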